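-- pv_equiv track=rewrite | github.com/sebGrn/Concise-1 | get_metrics.py | calculateMeasureMonocle
-- ===== SOURCE A (Python) =====
-- def calculateMeasureMonocle(extent, intent, outputConcepts):
--     sumA = 0
--     sumB = 0
--
--     for val in extent:
--         for concept in outputConcepts:
--             if not(val in concept[0]):
--                 sumA += 1
--
--     for val in intent:
--         for concept in outputConcepts:
--             if not(val in concept[1]):
--                 sumB += 1
--
--     a = len(extent) + sumA
--     b = len(intent) + sumB
--
--     return a * b
-- ===== SOURCE B (Python) =====
-- def calculateMeasureMonocle(extent, intent, outputConcepts):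
--     cntE = {}
--     for v in extent:
--         cntE[v] = cntE.get(v, 0) + 1
--     cntI = {}
--     for v in intent:
--         cntI[v] = cntI.get(v, 0) + 1
--     k = len(outputConcepts)
--     hitsA = 0
--     for c0, _ in outputConcepts:
--         for x in set(c0):
--             hitsA += cntE.get(x, 0)
--     hitsB = 0
--     for _, c1 in outputConcepts:
--         for x in set(c1):
--             hitsB += cntI.get(x, 0)
--     a = len(extent) * (k + 1) - hitsA
--     b = len(intent) * (k + 1) - hitsB
--     return a * b
-- ===== Notes on version B (the rewrite author's own statement) =====
-- stated objective: faster
-- what changed: B replaces A's per-element scan of every concept's membership list with counter dicts built once over extent/intent plus one pass over each concept's deduplicated elements, computing the non-membership counts as total-minus-hits.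
import Mathlib
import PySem

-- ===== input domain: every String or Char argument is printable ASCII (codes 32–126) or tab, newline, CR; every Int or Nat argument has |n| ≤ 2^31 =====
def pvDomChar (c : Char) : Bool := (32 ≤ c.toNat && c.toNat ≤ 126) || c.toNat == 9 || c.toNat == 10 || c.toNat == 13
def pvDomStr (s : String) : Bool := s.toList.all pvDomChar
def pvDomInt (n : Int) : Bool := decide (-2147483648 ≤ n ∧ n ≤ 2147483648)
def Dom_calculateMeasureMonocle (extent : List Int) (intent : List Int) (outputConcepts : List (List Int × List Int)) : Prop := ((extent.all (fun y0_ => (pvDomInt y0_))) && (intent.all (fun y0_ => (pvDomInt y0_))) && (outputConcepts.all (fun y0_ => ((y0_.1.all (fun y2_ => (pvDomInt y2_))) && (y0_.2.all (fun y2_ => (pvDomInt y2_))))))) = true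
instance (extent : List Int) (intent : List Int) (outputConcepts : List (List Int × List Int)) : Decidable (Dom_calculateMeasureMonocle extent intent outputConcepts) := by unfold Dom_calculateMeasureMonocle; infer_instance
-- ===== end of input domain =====

-- B builds counter dicts over extent/intent once and sums hits over each concept's
-- distinct elements, returning (total - hits) products: asymptotically faster than
-- A's nested membership scans.

-- ===== PORT A =====
def calculateMeasureMonocle (extent : List Int) (intent : List Int) (outputConcepts : List (List Int × List Int)) : Int :=
  let sumA : Int := extent.foldl (fun s val =>
    outputConcepts.foldl (fun t concept =>
      if ¬ (val ∈ concept.1) then t + 1 else t) s) 0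
  let sumB : Int := intent.foldl (fun s val =>
    outputConcepts.foldl (fun t concept =>
      if ¬ (val ∈ concept.2) then t + 1 else t) s) 0
  let a : Int := (extent.length : Int) + sumA
  let b : Int := (intent.length : Int) + sumB
  a * b

-- ===== PORT B =====
def calculateMeasureMonocle_alt (extent : List Int) (intent : List Int) (outputConcepts : List (List Int × List Int)) : Int :=
  let cntE : PySem.Dict Int Int := extent.foldl (fun d v => d.insert v (d.getD v 0 + 1)) PySem.Dict.empty
  let cntI : PySem.Dict Int Int := intent.foldl (fun d v => d.insert v (d.getD v 0 + 1)) PySem.Dict.empty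
  let k : Int := (outputConcepts.length : Int)
  let hitsA : Int := outputConcepts.foldl (fun h c =>
    (PySem.Set.ofList c.1).foldl (fun h x => h + cntE.getD x 0) h) 0
  let hitsB : Int := outputConcepts.foldl (fun h c =>
    (PySem.Set.ofList c.2).foldl (fun h x => h + cntI.getD x 0) h) 0
  let a : Int := (extent.length : Int) * (k + 1) - hitsA
  let b : Int := (intent.length : Int) * (k + 1) - hitsB
  a * b

-- ===== PRECONDITION & SPEC =====
def Spec_calculateMeasureMonocle (extent : List Int) (intent : List Int) (outputConcepts : List (List Int × List Int)) (out : Int) : Prop := out = calculateMeasureMonocle_alt extent intent outputConcepts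
instance (extent : List Int) (intent : List Int) (outputConcepts : List (List Int × List Int)) (out : Int) : Decidable (Spec_calculateMeasureMonocle extent intent outputConcepts out) := by unfold Spec_calculateMeasureMonocle; infer_instance

-- ===== CLAIM (what is proved, stated in full; the proofs are below) =====
def Claim_equal_calculateMeasureMonocle : Prop := ∀ (extent : List Int) (intent : List Int) (outputConcepts : List (List Int × List Int)), Dom_calculateMeasureMonocle extent intent outputConcepts → Spec_calculateMeasureMonocle extent intent outputConcepts (calculateMeasureMonocle extent intent outputConcepts)

-- ===== LEMMAS AND PROOFS =====

-- sum of the indicator of v over a nodup list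
theorem sum_indicator (v : Int) (d : List Int) (hd : d.Nodup) :
    (d.map (fun x => if v = x then (1 : Int) else 0)).sum = if v ∈ d then 1 else 0 := by
  induction d with
  | nil => simp
  | cons y ys ih =>
    have hys : ys.Nodup := (List.nodup_cons.mp hd).2
    by_cases h : v = y
    · subst h
      have hv : v ∉ ys := (List.nodup_cons.mp hd).1
      have hz : (ys.map (fun x => if v = x then (1 : Int) else 0)).sum = 0 := by
        refine List.sum_eq_zero ?_
        intro z hz
        obtain ⟨x, hx, rfl⟩ := List.mem_map.mp hz
        simp [show v ≠ x from fun he => hv (he ▸ hx)]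
      simp [hz]
    · simp [h, ih hys]

-- sum over a nodup list of counts = membership-weighted sum over the counted list
theorem sum_count_dedup (xs : List Int) (d : List Int) (hd : d.Nodup) :
    (d.map (fun x => (xs.count x : Int))).sum
      = (xs.map (fun v => if v ∈ d then (1 : Int) else 0)).sum := by
  induction xs with
  | nil => simp
  | cons v rest ih =>
    have hsplit : (d.map (fun x => ((v :: rest).count x : Int))).sum
        = (d.map (fun x => (rest.count x : Int))).sum
          + (d.map (fun x => if v = x then (1 : Int) else 0)).sum := by
      rw [← List.sum_map_add]
      refine congrArg List.sum (List.map_congr_left ?_)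
      intro x _
      by_cases h : v = x <;> simp [h]
    rw [hsplit, sum_indicator v d hd, ih, List.map_cons, List.sum_cons]
    ring

-- swapping a double list sum
theorem sum_map_swap {a b : Type} (xs : List a) (ys : List b) (f : a → b → Int) :
    (xs.map (fun u => (ys.map (fun w => f u w)).sum)).sum
      = (ys.map (fun w => (xs.map (fun u => f u w)).sum)).sum := by
  induction xs with
  | nil => simp
  | cons u rest ih => simp only [List.map_cons, List.sum_cons, ih, List.sum_map_add]

-- the A-side inner loop over concepts, as a length-minus-hits formula per element
theorem inner_loop_eq (ocs : List (List Int × List Int)) (sel : (List Int × List Int) → List Int) (val : Int) (s : Int) :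
    ocs.foldl (fun t concept => if ¬ (val ∈ sel concept) then t + 1 else t) s
      = s + (ocs.length : Int)
          - (ocs.map (fun c => if val ∈ sel c then (1 : Int) else 0)).sum := by
  induction ocs generalizing s with
  | nil => simp
  | cons c rest ih =>
    rw [List.foldl_cons, ih]
    by_cases h : val ∈ sel c <;> simp [h] <;> ring

-- the B-side hits loop, as a double membership-weighted sum
theorem hits_eq (xs : List Int) (ocs : List (List Int × List Int)) (sel : (List Int × List Int) → List Int) :
    ∀ s : Int, ocs.foldl (fun h c =>
        (PySem.Set.ofList (sel c)).foldl
          (fun h x => h + (xs.foldl (fun d v => d.insert v (d.getD v 0 + 1)) PySem.Dict.empty).getD x 0) h) s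
      = s + (ocs.map (fun c =>
          (xs.map (fun v => if v ∈ sel c then (1 : Int) else 0)).sum)).sum := by
    intro s
    induction ocs generalizing s with
    | nil => simp
    | cons c rest ih =>
      have hinner : (PySem.Set.ofList (sel c)).foldl
          (fun h x => h + (xs.foldl (fun d v => d.insert v (d.getD v 0 + 1)) PySem.Dict.empty).getD x 0) s
          = s + (xs.map (fun v => if v ∈ sel c then (1 : Int) else 0)).sum := by
        rw [PySem.List.foldl_add]
        congr 1
        have h1 : ((PySem.Set.ofList (sel c)).map
            (fun x => (xs.foldl (fun d v => d.insert v (d.getD v 0 + 1)) PySem.Dict.empty).getD x 0)).sum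
            = ((PySem.Set.ofList (sel c)).map (fun x => (xs.count x : Int))).sum := by
          refine congrArg List.sum (List.map_congr_left ?_)
          intro x _
          rw [PySem.Dict.getD_foldl_insert_add_one]
          simp only [PySem.Dict.getD_empty, Int.zero_add]
        have h2 : (xs.map (fun v => if v ∈ PySem.List.dedup (sel c) then (1 : Int) else 0))
            = (xs.map (fun v => if v ∈ sel c then (1 : Int) else 0)) := by
          refine List.map_congr_left ?_
          intro v _
          simp
        rw [h1, ← PySem.List.dedup_eq_ofList,
          sum_count_dedup xs (PySem.List.dedup (sel c)) (PySem.List.nodup_dedup _), h2]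
      rw [List.foldl_cons, hinner, ih]
      simp only [List.map_cons, List.sum_cons]
      ring

-- the A-side double loop, as length*k minus a double membership-weighted sum
theorem aSide_eq (xs : List Int) (ocs : List (List Int × List Int)) (sel : (List Int × List Int) → List Int) :
    ∀ s : Int, xs.foldl (fun s val =>
        ocs.foldl (fun t concept => if ¬ (val ∈ sel concept) then t + 1 else t) s) s
      = s + (xs.length : Int) * (ocs.length : Int)
        - (xs.map (fun val =>
            (ocs.map (fun c => if val ∈ sel c then (1 : Int) else 0)).sum)).sum := by
    intro s
    induction xs generalizing s with
    | nil => simp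
    | cons v rest ih =>
      rw [List.foldl_cons, inner_loop_eq, ih]
      simp only [List.map_cons, List.sum_cons, List.length_cons]
      push_cast
      ring

-- one side of the computation: A's (len + sumA) = B's (len*(k+1) - hits)
theorem side_eq (xs : List Int) (ocs : List (List Int × List Int)) (sel : (List Int × List Int) → List Int) :
    (xs.length : Int)
      + xs.foldl (fun s val =>
          ocs.foldl (fun t concept => if ¬ (val ∈ sel concept) then t + 1 else t) s) 0
      = (xs.length : Int) * ((ocs.length : Int) + 1)
        - ocs.foldl (fun h c =>
            (PySem.Set.ofList (sel c)).foldl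
              (fun h x => h + (xs.foldl (fun d v => d.insert v (d.getD v 0 + 1)) PySem.Dict.empty).getD x 0) h) 0 := by
  rw [aSide_eq xs ocs sel 0, hits_eq xs ocs sel 0,
    sum_map_swap xs ocs (fun val c => if val ∈ sel c then (1 : Int) else 0)]
  ring

-- ===== VERDICT (by name: the statement is the Claim_ definition above) =====
theorem calculateMeasureMonocle_spec : Claim_equal_calculateMeasureMonocle := by
  intro extent intent ocs _
  show calculateMeasureMonocle extent intent ocs = calculateMeasureMonocle_alt extent intent ocs
  simp only [calculateMeasureMonocle, calculateMeasureMonocle_alt]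
  rw [← side_eq extent ocs (fun c => c.1), ← side_eq intent ocs (fun c => c.2)]
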